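-- pv_equiv track=rewrite | github.com/Darkaken/floid-metrics | src/second_stage.py | filter_zero
-- ===== SOURCE A (Python) =====
-- def filter_zero(rut):
--
--     final = ""
--     digit_found = False
--
--     for char in rut:
--         if char == "0":
--             if digit_found:
--                 final += char
--             else:
--                 pass
--         else:
--             digit_found = True
--             final += char
--
--     return final
-- ===== SOURCE B (Python) =====
-- def filter_zero(rut):
--     i = 0
--     while i < len(rut) and rut[i] == "0":
--         i += 1
--     return rut[i:]
-- ===== Notes on version B (the rewrite author's own statement) =====
-- stated objective: simpler
-- what changed: B finds the index of the first non-zero character with a boundary scan and returns one slice, instead of A's character-by-character rebuild with an accumulator string and a digit_found flag.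
import Mathlib
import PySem

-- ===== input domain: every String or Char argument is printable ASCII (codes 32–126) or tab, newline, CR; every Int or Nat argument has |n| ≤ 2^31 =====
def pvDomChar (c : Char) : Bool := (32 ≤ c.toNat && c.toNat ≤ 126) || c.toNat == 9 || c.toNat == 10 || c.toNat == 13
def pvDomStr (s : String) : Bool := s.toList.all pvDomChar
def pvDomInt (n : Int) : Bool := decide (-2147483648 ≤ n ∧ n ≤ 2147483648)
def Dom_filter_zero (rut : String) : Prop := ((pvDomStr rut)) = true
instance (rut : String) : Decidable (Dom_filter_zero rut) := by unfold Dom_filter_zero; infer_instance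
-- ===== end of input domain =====

-- B strips leading zeros by computing the split index and slicing once, instead of A's
-- accumulator string plus digit_found flag rebuilt character by character (objective: simpler).

-- ===== PORT A =====
-- A's loop state: (final, digit_found); branch order as in the Python.
def fzStepA (st : List Char × Bool) (c : Char) : List Char × Bool :=
  if c = '0' then
    if st.2 then (st.1 ++ [c], st.2) else st
  else (st.1 ++ [c], true)

def filter_zero (rut : String) : String :=
  String.mk (rut.toList.foldl fzStepA ([], false)).1

-- ===== PORT B =====
-- the while loop: advance i while i < len and rut[i] == '0'
def fzIndex : List Char → Nat
  | [] => 0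
  | c :: rest => if c = '0' then fzIndex rest + 1 else 0

-- rut[i:] with 0 ≤ i ≤ len is drop i
def filter_zero_alt (rut : String) : String :=
  String.mk (rut.toList.drop (fzIndex rut.toList))

-- ===== PRECONDITION & SPEC =====
def Spec_filter_zero (rut : String) (out : String) : Prop := out = filter_zero_alt rut
instance (rut : String) (out : String) : Decidable (Spec_filter_zero rut out) := by unfold Spec_filter_zero; infer_instance

-- ===== CLAIM (what is proved, stated in full; the proofs are below) =====
def Claim_equal_filter_zero : Prop := ∀ (rut : String), Dom_filter_zero rut → Spec_filter_zero rut (filter_zero rut)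

-- ===== LEMMAS AND PROOFS =====
-- once digit_found is true, A's loop appends every remaining char
theorem fz_fold_true (cs : List Char) (acc : List Char) :
    cs.foldl fzStepA (acc, true) = (acc ++ cs, true) := by
  induction cs generalizing acc with
  | nil => simp
  | cons c rest ih =>
    simp only [List.foldl_cons, fzStepA]
    by_cases h : c = '0' <;> simp [h, ih]

-- from the initial state, A's result is the drop at B's index
theorem fz_fold_false (cs : List Char) :
    (cs.foldl fzStepA ([], false)).1 = cs.drop (fzIndex cs) := by
  induction cs with
  | nil => simp
  | cons c rest ih =>
    by_cases h : c = '0'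
    · simp [fzStepA, fzIndex, h, ih]
    · simp [fzStepA, fzIndex, h, fz_fold_true]

-- ===== VERDICT (by name: the statement is the Claim_ definition above) =====
theorem filter_zero_spec : Claim_equal_filter_zero := by
  intro rut _
  unfold Spec_filter_zero filter_zero filter_zero_alt
  rw [fz_fold_false]
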